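-- pv_equiv track=rewrite | github.com/granttremel/genomics | ggene/seqs/bio.py | index_to_seq_abs
-- ===== SOURCE A (Python) =====
-- ORDER = 'ATGCWRMKYSDHVBN-'
--
-- def index_to_seq(ind, seq_len = 4):
--     nbs = 4
--     if ind == 0:
--         return ORDER[0]*seq_len
--     inds = [(ind//nbs**k)%nbs for k in range(seq_len-1, -1, -1)]
--     return "".join(ORDER[i] for i in inds)
--
-- def index_to_seq_abs(ind):
--     seq_len = 0
--     ip = ind+1
--     while ip > 0:
--         seq_len += 1
--         ip -= 4**seq_len
--     ipp = ip + 4**seq_len - 1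
--     seq = index_to_seq(ipp, seq_len = seq_len+1)
--     if seq:
--         return seq[1:]
--
--     else:
--         return ""
-- ===== SOURCE B (Python) =====
-- ORDER = 'ATGCWRMKYSDHVBN-'
--
-- def index_to_seq_abs(ind):
--     n = ind + 1
--     out = []
--     while n > 0:
--         n, r = divmod(n - 1, 4)
--         out.append(ORDER[r])
--     return "".join(reversed(out))
-- ===== Notes on version B (the rewrite author's own statement) =====
-- stated objective: simpler
-- what changed: A's two phases (a subtract-powers loop to find the length, then a base-4 digit comprehension plus a leading-character drop) are fused into one bijective base-4 divmod loop that emits the digits directly.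
import Mathlib
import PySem

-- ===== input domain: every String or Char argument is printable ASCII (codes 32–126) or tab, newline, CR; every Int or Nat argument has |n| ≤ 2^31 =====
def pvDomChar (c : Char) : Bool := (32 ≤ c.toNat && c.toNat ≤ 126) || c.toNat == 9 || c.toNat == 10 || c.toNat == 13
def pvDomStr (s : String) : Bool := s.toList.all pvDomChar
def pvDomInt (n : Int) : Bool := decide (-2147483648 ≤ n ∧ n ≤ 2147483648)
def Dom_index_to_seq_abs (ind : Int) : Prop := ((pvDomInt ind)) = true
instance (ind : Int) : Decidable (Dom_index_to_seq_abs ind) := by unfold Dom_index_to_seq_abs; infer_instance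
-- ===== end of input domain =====

-- B replaces A's two phases (subtract-powers length loop, then a base-4 digit comprehension and a
-- leading-character drop) by a single bijective base-4 divmod loop; objective: simpler, same cost.

-- Python '//' agrees with Euclidean '/' for a positive divisor (cited by the ports' decreasing_by)
theorem pyFloordiv_pos (a b : Int) (h : 0 < b) : PySem.Int.floordiv a b = a / b := by
  simp [PySem.Int.floordiv, Int.fdiv_eq_ediv, h.le]


-- ===== PORT A =====
def ORDERseq : String := "ATGCWRMKYSDHVBN-"

-- ORDER[i]: every index reaching it is (…) % 4 ∈ [0,4), so pyGet? is always `some`; the default is never used (exact)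
def orderChar (i : Int) : Char := (PySem.List.pyGet? ORDERseq.toList i).getD 'A'

def index_to_seq (ind : Int) (seq_len : Int) : String :=
  if ind = 0 then
    -- ORDER[0] * seq_len
    String.ofList (PySem.List.pyRepeat [orderChar 0] seq_len)
  else
    -- inds = [(ind // 4**k) % 4 for k in range(seq_len-1, -1, -1)]; every k produced by this range is ≥ 0, so 4**k = 4^k.toNat (exact)
    -- "".join(ORDER[i] for i in inds): each ORDER[i] is a single character
    String.ofList (((PySem.List.pyRange (seq_len - 1) (-1) (-1)).map
      (fun k => PySem.Int.mod (PySem.Int.floordiv ind (4 ^ k.toNat)) 4)).map orderChar)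

-- the while loop: state (seq_len, ip); seq_len stays ≥ 0, so 4**seq_len = 4^seq_len.toNat (exact)
def aLoop (seq_len ip : Int) : Int × Int :=
  if 0 < ip then aLoop (seq_len + 1) (ip - 4 ^ ((seq_len + 1).toNat)) else (seq_len, ip)
termination_by ip.toNat
decreasing_by
  have h1 : (1 : Int) ≤ 4 ^ ((seq_len + 1).toNat) := one_le_pow₀ (by norm_num)
  omega

def index_to_seq_abs (ind : Int) : String :=
  let p := aLoop 0 (ind + 1)
  let ipp := p.2 + 4 ^ (p.1.toNat) - 1
  let seq := index_to_seq ipp (p.1 + 1)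
  if seq ≠ "" then PySem.Str.slice seq (some 1) none else ""

-- ===== PORT B =====
-- the while loop of Source B: emits ORDER[r] for n, r = divmod(n - 1, 4) until n ≤ 0, in append order (least significant first)
def bLoop (n : Int) : List Char :=
  if 0 < n then
    orderChar (PySem.Int.mod (n - 1) 4) :: bLoop (PySem.Int.floordiv (n - 1) 4)
  else []
termination_by n.toNat
decreasing_by
  rw [pyFloordiv_pos _ _ (by norm_num)]
  omega

-- "".join(reversed(out))
def index_to_seq_abs_alt (ind : Int) : String :=
  String.ofList ((bLoop (ind + 1)).reverse)

-- ===== PRECONDITION & SPEC =====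
def Spec_index_to_seq_abs (ind : Int) (out : String) : Prop := out = index_to_seq_abs_alt ind
instance (ind : Int) (out : String) : Decidable (Spec_index_to_seq_abs ind out) := by unfold Spec_index_to_seq_abs; infer_instance

-- ===== CLAIM (what is proved, stated in full; the proofs are below) =====
def Claim_equal_index_to_seq_abs : Prop := ∀ (ind : Int), Dom_index_to_seq_abs ind → Spec_index_to_seq_abs ind (index_to_seq_abs ind)

-- ===== LEMMAS AND PROOFS =====

theorem pyMod_pos (a b : Int) (h : 0 < b) : PySem.Int.mod a b = a % b := by
  simp [PySem.Int.mod, Int.fmod_eq_emod, h.le]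

-- psum L = 4^1 + 4^2 + … + 4^L, the total subtracted by A's while loop after L iterations
def psum : Nat → Int
  | 0 => 0
  | L + 1 => psum L + 4 ^ (L + 1)

theorem psum_succ (L : Nat) : psum (L + 1) = psum L + 4 ^ (L + 1) := rfl

theorem one_le_four_pow (k : Nat) : (1 : Int) ≤ 4 ^ k := one_le_pow₀ (by norm_num)

theorem psum_nonneg (L : Nat) : 0 ≤ psum L := by
  induction L with
  | zero => simp [psum]
  | succ L ih =>
    have := one_le_four_pow (L + 1)
    rw [psum_succ]; omega

theorem three_psum (L : Nat) : 3 * psum L + 4 = 4 ^ (L + 1) := by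
  induction L with
  | zero => norm_num [psum]
  | succ L ih =>
    rw [psum_succ]
    conv_rhs => rw [pow_succ]
    omega

theorem psum_mul4 (L : Nat) : psum (L + 1) = 4 * (psum L + 1) := by
  have h3 := three_psum L
  rw [psum_succ]
  omega

theorem psum_mono {a b : Nat} (h : a ≤ b) : psum a ≤ psum b := by
  induction b with
  | zero =>
    have ha : a = 0 := by omega
    simp [ha]
  | succ b ih =>
    rcases Nat.lt_or_ge a (b + 1) with hlt | hge
    · have h1 := ih (by omega)
      have h2 := one_le_four_pow (b + 1)
      rw [psum_succ]; omega
    · have ha : a = b + 1 := by omega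
      rw [ha]

-- zeta-expanded form of A's body, with the loop's result abstracted
theorem A_closed (ind : Int) (p : Int × Int) (hp : aLoop 0 (ind + 1) = p) :
    index_to_seq_abs ind =
      if index_to_seq (p.2 + 4 ^ p.1.toNat - 1) (p.1 + 1) ≠ ""
      then PySem.Str.slice (index_to_seq (p.2 + 4 ^ p.1.toNat - 1) (p.1 + 1)) (some 1) none
      else "" := by
  subst hp; rfl

-- A's while loop: started at seq_len = s with ip = n - psum s, it runs exactly L+1 more times
-- when psum (s+L) < n ≤ psum (s+L+1)
theorem aLoop_run : ∀ (L s : Nat) (n : Int), psum (s + L) < n → n ≤ psum (s + L + 1) →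
    aLoop (s : Int) (n - psum s) = (((s + L + 1 : Nat) : Int), n - psum (s + L + 1)) := by
  intro L
  induction L with
  | zero =>
    intro s n h1 h2
    simp only [Nat.add_zero] at h1 h2 ⊢
    have hnat : ((s : Int) + 1).toNat = s + 1 := by omega
    rw [aLoop, if_pos (by omega), hnat]
    have hval : n - psum s - 4 ^ (s + 1) = n - psum (s + 1) := by
      rw [psum_succ]; ring
    rw [hval, aLoop, if_neg (by omega)]
    rw [Prod.mk.injEq]
    exact ⟨by push_cast; ring, rfl⟩
  | succ L ih =>
    intro s n h1 h2
    have heq1 : s + (L + 1) = s + L + 1 := by omega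
    rw [heq1] at h1
    have hub : psum s ≤ psum (s + L + 1) := psum_mono (by omega)
    have hnat : ((s : Int) + 1).toNat = s + 1 := by omega
    rw [aLoop, if_pos (by omega), hnat]
    have hval : n - psum s - 4 ^ (s + 1) = n - psum (s + 1) := by
      rw [psum_succ]; ring
    have hcast : (s : Int) + 1 = ((s + 1 : Nat) : Int) := by push_cast; ring
    rw [hval, hcast, ih (s + 1) n (by have : s + 1 + L = s + L + 1 := by omega
                                      rw [this]; exact h1)
                                  (by have : s + 1 + L + 1 = s + (L + 1) + 1 := by omega
                                      rw [this]; exact h2)]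
    have heq2 : s + 1 + L + 1 = s + (L + 1) + 1 := by omega
    rw [heq2]

-- every positive n lies in exactly one band (psum L, psum (L+1)]
theorem exists_band (n : Int) (hn : 0 < n) : ∃ L : Nat, psum L < n ∧ n ≤ psum (L + 1) := by
  have h1 : 1 ≤ n := hn
  induction n, h1 using Int.le_induction with
  | base => exact ⟨0, by norm_num [psum]⟩
  | succ n hn' ih =>
    obtain ⟨L, hL1, hL2⟩ := ih (by omega)
    rcases le_or_gt (n + 1) (psum (L + 1)) with h | h
    · exact ⟨L, by omega, h⟩
    · refine ⟨L + 1, by omega, ?_⟩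
      have := one_le_four_pow (L + 1 + 1)
      rw [psum_succ (L + 1)]
      omega

-- reversing a map over range flips the index
theorem rev_map_range {α : Type} (n : Nat) (g : Nat → α) :
    ((List.range n).map g).reverse = (List.range n).map (fun k => g (n - 1 - k)) := by
  apply List.ext_getElem (by simp)
  intro i h1 h2
  simp [List.getElem_reverse]

-- B's loop produces the ordinary base-4 digits (LSB first) of m = n - psum L - 1, padded to L+1 digits
theorem bLoop_eq : ∀ (L : Nat) (n : Int), psum L < n → n ≤ psum (L + 1) →
    bLoop n = (List.range (L + 1)).map (fun k => orderChar ((n - psum L - 1) / 4 ^ k % 4)) := by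
  intro L
  induction L with
  | zero =>
    intro n h1 h2
    have hp0 : psum 0 = 0 := rfl
    have hp1 : psum 1 = 4 := by norm_num [psum]
    rw [hp0] at h1 ⊢
    rw [hp1] at h2
    rw [bLoop, if_pos (by omega), pyFloordiv_pos _ _ (by norm_num), pyMod_pos _ _ (by norm_num)]
    have hq : (n - 1) / 4 = 0 := by omega
    rw [hq, bLoop, if_neg (by omega)]
    simp
  | succ L ih =>
    intro n h1 h2
    have hmul : psum (L + 1) = 4 * (psum L + 1) := psum_mul4 L
    have hmul2 : psum (L + 1 + 1) = 4 * (psum (L + 1) + 1) := psum_mul4 (L + 1)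
    have hps : 0 ≤ psum L := psum_nonneg L
    rw [bLoop, if_pos (by omega), pyFloordiv_pos _ _ (by norm_num), pyMod_pos _ _ (by norm_num)]
    have hq1 : psum L < (n - 1) / 4 := by omega
    have hq2 : (n - 1) / 4 ≤ psum (L + 1) := by omega
    rw [ih _ hq1 hq2]
    conv_rhs => rw [List.range_succ_eq_map]
    rw [List.map_cons, List.map_map]
    congr 1
    · congr 1
      simp only [pow_zero, Int.ediv_one]
      omega
    · apply List.map_congr_left
      intro k _
      simp only [Function.comp_apply]
      congr 1
      have hstep : (n - 1) / 4 - psum L - 1 = (n - psum (L + 1) - 1) / 4 := by omega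
      rw [hstep, Int.ediv_ediv_of_nonneg, pow_succ']
      norm_num

-- index_to_seq m (L+2) spells out the L+2 base-4 digits of m, most significant first
theorem its_eq (L : Nat) (m : Int) :
    index_to_seq m ((L : Int) + 2) =
      String.ofList ((List.range (L + 2)).map (fun k => orderChar (m / 4 ^ (L + 1 - k) % 4))) := by
  by_cases hm : m = 0
  · subst hm
    rw [index_to_seq, if_pos rfl]
    have ht : ((L : Int) + 2) = ((L + 2 : Nat) : Int) := by push_cast; ring
    rw [ht, PySem.List.pyRepeat_singleton, Int.toNat_natCast]
    congr 1
    symm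
    rw [List.eq_replicate_iff]
    refine ⟨by simp, ?_⟩
    intro b hb
    simp only [List.mem_map, List.mem_range] at hb
    obtain ⟨k, _, hk⟩ := hb
    rw [← hk]
    norm_num
  · rw [index_to_seq, if_neg hm]
    have hr : (L : Int) + 2 - 1 = (L : Int) + 1 := by ring
    rw [hr, PySem.List.pyRange_neg_one]
    have ht : ((L : Int) + 1 - (-1)).toNat = L + 2 := by omega
    rw [ht, List.map_map, List.map_map]
    congr 1
    apply List.map_congr_left
    intro k hk
    have hk' : k < L + 2 := List.mem_range.mp hk
    simp only [Function.comp_apply]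
    have htn : ((L : Int) + 1 - (k : Int)).toNat = L + 1 - k := by omega
    rw [htn, pyFloordiv_pos _ _ (by positivity), pyMod_pos _ _ (by norm_num)]

-- ===== VERDICT (by name: the statement is the Claim_ definition above) =====
theorem index_to_seq_abs_spec : Claim_equal_index_to_seq_abs := by
  intro ind _
  unfold Spec_index_to_seq_abs index_to_seq_abs_alt
  rcases le_or_gt (ind + 1) 0 with hneg | hpos
  · -- the loop never runs: seq has a single character, seq[1:] = "" = B's empty join
    rw [A_closed ind (0, ind + 1) (by rw [aLoop, if_neg (by omega)])]
    have hB : bLoop (ind + 1) = [] := by rw [bLoop, if_neg (by omega)]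
    rw [hB]
    simp only [Int.toNat_zero, pow_zero]
    have hipp : ind + 1 + 1 - 1 = ind + 1 := by ring
    rw [hipp]
    have hone : index_to_seq (ind + 1) ((0 : Int) + 1) = String.ofList [orderChar ((ind + 1) % 4)] ∨
        index_to_seq (ind + 1) ((0 : Int) + 1) = String.ofList [orderChar 0] := by
      by_cases h0 : ind + 1 = 0
      · right
        rw [index_to_seq, if_pos h0]
        rfl
      · left
        rw [index_to_seq, if_neg h0]
        have h01 : (0 : Int) + 1 - 1 = 0 := by ring
        rw [h01, PySem.List.pyRange_neg_one]
        have ht : ((0 : Int) - (-1)).toNat = 1 := by norm_num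
        rw [ht]
        simp only [List.range_one, List.map_cons, List.map_nil]
        rw [pyFloordiv_pos _ _ (by norm_num), pyMod_pos _ _ (by norm_num)]
        norm_num
    rcases hone with h | h <;> rw [h] <;>
      · rw [if_pos (by intro hc; have := congrArg String.toList hc; simp at this)]
        apply String.toList_inj.mp
        simp [PySem.List.slice_from_one]
  · -- the loop runs: n = ind + 1 lies in the band (psum L, psum (L+1)]
    obtain ⟨L, h1, h2⟩ := exists_band (ind + 1) hpos
    have hrun := aLoop_run L 0 (ind + 1) (by simpa using h1) (by simpa using h2)
    have hp0 : psum 0 = 0 := rfl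
    simp only [Nat.zero_add, Int.natCast_zero, hp0, sub_zero] at hrun
    rw [A_closed ind _ hrun]
    simp only [Int.toNat_natCast]
    have hmval : ind + 1 - psum (L + 1) + 4 ^ (L + 1) - 1 = ind + 1 - psum L - 1 := by
      rw [psum_succ]; ring
    have hcast : ((L + 1 : Nat) : Int) + 1 = (L : Int) + 2 := by push_cast; ring
    rw [hmval, hcast, its_eq L (ind + 1 - psum L - 1)]
    have hm0 : 0 ≤ ind + 1 - psum L - 1 := by omega
    have hmlt : ind + 1 - psum L - 1 < 4 ^ (L + 1) := by
      have := psum_succ L; omega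
    rw [List.range_succ_eq_map, List.map_cons, List.map_map]
    rw [if_pos (by intro hc; have := congrArg String.toList hc; simp at this)]
    apply String.toList_inj.mp
    simp only [PySem.Str.toList_slice, PySem.Chars.slice_eq_listSlice, PySem.List.slice_from_one,
      String.toList_ofList, List.tail_cons]
    rw [bLoop_eq L (ind + 1) h1 h2, rev_map_range]
    apply List.map_congr_left
    intro k hk
    have hk' : k < L + 1 := List.mem_range.mp hk
    simp only [Function.comp_apply]
    have hexp : L + 1 - (k + 1) = L + 1 - 1 - k := by omega
    rw [hexp]
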